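-- pv_equiv track=rewrite | github.com/pokerdio/generic | euler/euler-701.py | mk_state
-- ===== SOURCE A (Python) =====
-- def mk_state(subset):
--     """a state is the biggest dead area followed by a list of:
--     surface id (0 none) followed by a list of total areas by id"""
--     active_shooter = False
--     id = []
--     area = []
--     for i in range(len(subset)):
--         col = subset[i]
--         if col:
--             if active_shooter:
--                 area[-1] += 1
--             else:
--                 area.append(1)
--                 active_shooter = True
--             id.append(len(area) - 1)
--         else:
--             active_shooter = 0
--             id.append(-1)
--     return (0, tuple(id), tuple(area))
-- ===== SOURCE B (Python) =====
-- def mk_state(subset):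
--     """a state is the biggest dead area followed by a list of:
--     surface id (0 none) followed by a list of total areas by id"""
--     # phase 1: run-length encode the row by truthiness
--     runs = []
--     for col in subset:
--         b = bool(col)
--         if runs and runs[-1][0] == b:
--             runs[-1][1] += 1
--         else:
--             runs.append([b, 1])
--     # phase 2: emit ids and areas from the runs
--     id = []
--     area = []
--     seg = 0
--     for b, L in runs:
--         if b:
--             area.append(L)
--             id += [seg] * L
--             seg += 1
--         else:
--             id += [-1] * L
--     return (0, tuple(id), tuple(area))
-- ===== Notes on version B (the rewrite author's own statement) =====
-- stated objective: alternative
-- what changed: A is a single stateful sweep with an active_shooter flag mutating the last area entry in place; B first run-length-encodes the row by truthiness, then a second pass emits the id and area tuples from the runs with a segment counter.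
import Mathlib
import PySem

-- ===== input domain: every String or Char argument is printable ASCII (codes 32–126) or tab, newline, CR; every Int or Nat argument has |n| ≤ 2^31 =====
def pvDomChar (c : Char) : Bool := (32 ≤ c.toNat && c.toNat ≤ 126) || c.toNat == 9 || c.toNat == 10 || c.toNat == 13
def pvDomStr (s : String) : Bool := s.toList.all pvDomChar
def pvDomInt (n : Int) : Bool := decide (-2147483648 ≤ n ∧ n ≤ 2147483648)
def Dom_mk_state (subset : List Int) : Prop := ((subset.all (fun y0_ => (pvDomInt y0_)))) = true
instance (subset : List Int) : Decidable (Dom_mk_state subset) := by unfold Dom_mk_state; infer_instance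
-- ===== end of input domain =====

-- B re-implements mk_state as run-length encoding followed by a run-emitting pass (alternative decomposition, same cost).


-- ===== PORT A =====
-- one loop step of A: state (active_shooter, id, area)
def mkStateAStep (st : Bool × List Int × List Int) (col : Int) : Bool × List Int × List Int :=
  if col ≠ 0 then
    let area' := if st.1 then st.2.2.dropLast ++ [st.2.2.getLast! + 1] else st.2.2 ++ [1]
    (true, st.2.1 ++ [(area'.length : Int) - 1], area')
  else
    (false, st.2.1 ++ [-1], st.2.2)

def mk_state (subset : List Int) : Int × List Int × List Int :=
  let st := subset.foldl mkStateAStep (false, [], [])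
  (0, st.2.1, st.2.2)

-- ===== PORT B =====
-- phase 1 step: run-length encode by truthiness
def mkStateRunStep (runs : List (Bool × Int)) (col : Int) : List (Bool × Int) :=
  let b : Bool := col ≠ 0
  match runs.getLast? with
  | some (lb, L) => if lb == b then runs.dropLast ++ [(lb, L + 1)] else runs ++ [(b, 1)]
  | none => runs ++ [(b, 1)]

-- phase 2 step: emit ids/areas from one run; state (id, area, seg)
def mkStateEmitStep (st : List Int × List Int × Int) (r : Bool × Int) : List Int × List Int × Int :=
  if r.1 then (st.1 ++ List.replicate r.2.toNat st.2.2, st.2.1 ++ [r.2], st.2.2 + 1)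
  else (st.1 ++ List.replicate r.2.toNat (-1), st.2.1, st.2.2)

def mk_state_alt (subset : List Int) : Int × List Int × List Int :=
  let runs := subset.foldl mkStateRunStep []
  let st := runs.foldl mkStateEmitStep ([], [], 0)
  (0, st.1, st.2.1)

-- ===== PRECONDITION & SPEC =====
def Spec_mk_state (subset : List Int) (out : Int × List Int × List Int) : Prop := out = mk_state_alt subset
instance (subset : List Int) (out : Int × List Int × List Int) : Decidable (Spec_mk_state subset out) := by unfold Spec_mk_state; infer_instance

-- ===== CLAIM (what is proved, stated in full; the proofs are below) =====
def Claim_equal_mk_state : Prop := ∀ (subset : List Int), Dom_mk_state subset → Spec_mk_state subset (mk_state subset)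

-- ===== LEMMAS AND PROOFS =====

-- the coupled invariant between A's fold state and B's runs
theorem mk_state_inv (xs : List Int) :
    (xs.foldl mkStateRunStep []).foldl mkStateEmitStep ([], [], 0) =
      ((xs.foldl mkStateAStep (false, [], [])).2.1,
       (xs.foldl mkStateAStep (false, [], [])).2.2,
       ((xs.foldl mkStateAStep (false, [], [])).2.2.length : Int)) ∧
    (xs.foldl mkStateAStep (false, [], [])).1 =
      (((xs.foldl mkStateRunStep []).getLast?).map Prod.fst).getD false ∧
    ∀ r ∈ xs.foldl mkStateRunStep [], 1 ≤ r.2 := by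
  induction xs using List.reverseRecOn with
  | nil => decide
  | append_singleton xs x ih =>
    obtain ⟨hemit, hact, hlen⟩ := ih
    rcases hS : xs.foldl mkStateAStep (false, [], []) with ⟨a, i, ar⟩
    rw [hS] at hemit hact
    simp only [List.foldl_append, List.foldl_cons, List.foldl_nil, hS]
    rcases hrs : (xs.foldl mkStateRunStep []).getLast? with _ | ⟨lb, L⟩
    · -- no runs yet: A's state is still the initial one
      have hnil : xs.foldl mkStateRunStep [] = [] := List.getLast?_eq_none_iff.mp hrs
      rw [hnil] at hemit hact ⊢
      simp only [List.foldl_nil, Prod.mk.injEq] at hemit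
      simp only [List.getLast?_nil, Option.map_none, Option.getD_none] at hact
      obtain ⟨hi, har, -⟩ := hemit
      subst hact; rw [← hi, ← har]
      by_cases hx : x = 0 <;>
        simp [mkStateAStep, mkStateRunStep, mkStateEmitStep, hx]
    · -- last run is (lb, L): runs = l' ++ [(lb, L)]
      obtain ⟨l', hl'⟩ := List.getLast?_eq_some_iff.mp hrs
      have hL1 : 1 ≤ L := hlen (lb, L) (by rw [hl']; simp)
      have hLrep : ∀ (v : Int), List.replicate (L + 1).toNat v
          = List.replicate L.toNat v ++ [v] := by
        intro v
        rw [show (L + 1).toNat = L.toNat + 1 by omega, List.replicate_succ']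
      rw [hl'] at hemit hact hlen ⊢
      simp only [List.getLast?_concat, Option.map_some, Option.getD_some] at hact
      simp only [List.foldl_append, List.foldl_cons, List.foldl_nil] at hemit ⊢
      rcases hE : l'.foldl mkStateEmitStep ([], [], 0) with ⟨i0, a0, s0⟩
      rw [hE] at hemit
      simp only [mkStateRunStep, List.getLast?_concat, List.dropLast_concat]
      rcases lb
      · -- last run falsy ⇒ active_shooter = False
        simp only [mkStateEmitStep, if_neg (by simp : ¬ ((false, L).1 = true)),
          Prod.mk.injEq] at hemit
        obtain ⟨hi, har, hs⟩ := hemit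
        subst hact
        by_cases hx : x = 0
        · -- extend the dead run
          refine ⟨?_, ?_, ?_⟩
          · simp [hx, mkStateAStep, mkStateEmitStep, hE, hLrep, ← hi, har, hs]
          · simp [hx, mkStateAStep]
          · intro r hr
            rw [hx, show (false == decide ((0:Int) ≠ 0)) = true from by decide,
              if_pos rfl] at hr
            rcases List.mem_append.mp hr with h | h
            · exact hlen r (List.mem_append.mpr (Or.inl h))
            · rcases List.mem_singleton.mp h with rfl; simp; omega
        · -- start a new live run
          refine ⟨?_, ?_, ?_⟩
          · simp [hx, mkStateAStep, mkStateEmitStep, hE, ← hi, har, hs, List.replicate_one]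
          · simp [hx, mkStateAStep]
          · intro r hr
            rw [show (false == decide (x ≠ 0)) = false from by simp [hx],
              if_neg Bool.false_ne_true] at hr
            rcases List.mem_append.mp hr with h | h
            · exact hlen r h
            · rcases List.mem_singleton.mp h with rfl; simp
      · -- last run truthy ⇒ active_shooter = True
        simp only [mkStateEmitStep] at hemit
        simp only [if_true, Prod.mk.injEq] at hemit
        obtain ⟨hi, har, hs⟩ := hemit
        subst hact
        by_cases hx : x = 0
        · -- start a new dead run
          refine ⟨?_, ?_, ?_⟩
          · simp [hx, mkStateAStep, mkStateEmitStep, hE, ← hi, ← har, hs, List.replicate_one]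
          · simp [hx, mkStateAStep]
          · intro r hr
            rw [hx, show (true == decide ((0:Int) ≠ 0)) = false from by decide,
              if_neg Bool.false_ne_true] at hr
            rcases List.mem_append.mp hr with h | h
            · exact hlen r h
            · rcases List.mem_singleton.mp h with rfl; simp
        · -- increment last area / last run
          have hs0 : s0 = (a0.length : Int) := by
            rw [← har] at hs; simp at hs; omega
          refine ⟨?_, ?_, ?_⟩
          · simp [hx, mkStateAStep, mkStateEmitStep, hE, hLrep, ← hi, ← har, hs0]
          · simp [hx, mkStateAStep]
          · intro r hr
            rw [show (true == decide (x ≠ 0)) = true from by simp [hx],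
              if_pos rfl] at hr
            rcases List.mem_append.mp hr with h | h
            · exact hlen r (List.mem_append.mpr (Or.inl h))
            · rcases List.mem_singleton.mp h with rfl; simp; omega

-- ===== VERDICT (by name: the statement is the Claim_ definition above) =====
theorem mk_state_spec : Claim_equal_mk_state := by
  intro subset _
  unfold Spec_mk_state mk_state mk_state_alt
  have h := (mk_state_inv subset).1
  simp only [h]
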